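-- pv_equiv track=rewrite | github.com/fienno/ImprovePython | functionsLibrary.py | sortedTags
-- ===== SOURCE A (Python) =====
-- from collections import Counter
--
-- def sortedTags(liste,n):
-- 	listetags = []
-- 	c = Counter(liste)
-- 	dico = dict(c)
-- 	dicoItems = dico.items()
-- 	for u in dicoItems:
-- 		if u[1] >= n:
-- 			listetags.append(u[0])
--
-- 	return listetags
-- ===== SOURCE B (Python) =====
-- def sortedTags(liste, n):
--     result = []
--     rest = liste
--     while rest:
--         x = rest[0]
--         if rest.count(x) >= n:
--             result.append(x)
--         rest = [y for y in rest[1:] if y != x]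
--     return result
-- ===== Notes on version B (the rewrite author's own statement) =====
-- stated objective: alternative
-- what changed: Replaces the Counter+dict pass by successive elimination: a while loop that repeatedly takes the first element of the remaining list, keeps it if its count reaches n, and strips all of its occurrences before continuing (same distinct elements in first-occurrence order).
import Mathlib
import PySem

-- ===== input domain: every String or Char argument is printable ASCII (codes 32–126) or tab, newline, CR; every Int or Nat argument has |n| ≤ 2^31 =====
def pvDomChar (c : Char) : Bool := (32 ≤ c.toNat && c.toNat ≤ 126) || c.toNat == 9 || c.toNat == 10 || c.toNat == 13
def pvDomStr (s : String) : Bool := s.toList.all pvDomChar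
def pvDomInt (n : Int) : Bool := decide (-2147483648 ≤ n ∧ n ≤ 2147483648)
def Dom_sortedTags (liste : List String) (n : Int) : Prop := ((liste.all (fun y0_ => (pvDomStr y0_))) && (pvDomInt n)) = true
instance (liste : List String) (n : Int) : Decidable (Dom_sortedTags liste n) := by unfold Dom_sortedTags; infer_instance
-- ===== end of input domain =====

-- B replaces A's Counter+dict pass by successive elimination: a while loop that takes the
-- first element of the remaining list, keeps it if its count reaches n, and strips all its
-- occurrences before continuing (same elements, first-occurrence order); objective: alternative.


-- ===== PORT A =====
def sortedTags (liste : List String) (n : Int) : List String :=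
  (PySem.Dict.counter liste).items.foldl
    (fun listetags u => if n ≤ u.2 then listetags ++ [u.1] else listetags) []

-- ===== PORT B =====
-- the while loop of Source B: state (result, rest); each step consumes rest[0], appends it to
-- result when rest.count(rest[0]) >= n, and strips its occurrences from the rest
def sortedTagsAltLoop (n : Int) (result : List String) (rest : List String) : List String :=
  match rest with
  | [] => result
  | x :: tail =>
      sortedTagsAltLoop n
        (if n ≤ (((x :: tail).count x : Nat) : Int) then result ++ [x] else result)
        (tail.filter (fun y => y ≠ x))
termination_by rest.length
decreasing_by
  simp only [List.length_cons, Nat.lt_succ_iff, List.length_unattach]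
  exact le_trans (List.length_filter_le _ _) (by simp)

def sortedTags_alt (liste : List String) (n : Int) : List String :=
  sortedTagsAltLoop n [] liste

-- ===== PRECONDITION & SPEC =====
def Spec_sortedTags (liste : List String) (n : Int) (out : List String) : Prop := out = sortedTags_alt liste n
instance (liste : List String) (n : Int) (out : List String) : Decidable (Spec_sortedTags liste n out) := by unfold Spec_sortedTags; infer_instance

-- ===== CLAIM (what is proved, stated in full; the proofs are below) =====
def Claim_equal_sortedTags : Prop := ∀ (liste : List String) (n : Int), Dom_sortedTags liste n → Spec_sortedTags liste n (sortedTags liste n)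

-- ===== LEMMAS AND PROOFS =====

-- A's loop over Counter items = filter over the first-occurrence dedup of liste.
theorem sideA (liste : List String) (n : Int) :
    sortedTags liste n
      = (PySem.Set.ofList liste).filter (fun k => decide (n ≤ (liste.count k : Int))) := by
  unfold sortedTags
  rw [PySem.Dict.items_counter]
  rw [show (fun listetags (u : String × Int) => if n ≤ u.2 then listetags ++ [u.1] else listetags)
        = (fun acc (u : String × Int) => if decide (n ≤ u.2) = true then acc ++ [u.1] else acc) by
      funext a u; simp]
  rw [PySem.List.foldl_append_if (p := fun u : String × Int => decide (n ≤ u.2)) (f := Prod.fst)]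
  simp [List.filter_map, List.map_map, Function.comp_def]

-- stripping x from t commutes with first-occurrence dedup
theorem strip (x : String) (t : List String) :
    (PySem.Set.ofList t).discard x = PySem.Set.ofList (t.filter (fun y => y ≠ x)) := by
  induction t with
  | nil => rfl
  | cons a t ih =>
      by_cases h : a = x
      · subst h
        rw [List.filter_cons_of_neg (by simp), ← ih]
        simp [PySem.Set.ofList_cons, PySem.Set.discard, List.filter_filter]
      · have hL : (PySem.Set.ofList (a :: t)).discard x
            = a :: List.filter (fun y => (!(y == x)) && (!(y == a))) (PySem.Set.ofList t) := by
          rw [PySem.Set.ofList_cons]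
          simp only [PySem.Set.discard]
          rw [List.filter_cons_of_pos (by simp [h]), List.filter_filter]
        have hR : PySem.Set.ofList ((a :: t).filter (fun y => y ≠ x))
            = a :: List.filter (fun y => (!(y == a)) && (!(y == x))) (PySem.Set.ofList t) := by
          rw [List.filter_cons_of_pos (by simp [h]), PySem.Set.ofList_cons, ← ih]
          simp only [PySem.Set.discard]
          rw [List.filter_filter]
        rw [hL, hR]
        congr 1
        congr 1
        funext y
        rw [Bool.and_comm]

-- loop invariant, by strong induction on the length of rest: the loop appends to result
-- the filtered first-occurrence dedup of rest (counts taken inside rest)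
theorem sideB_go (n : Int) (m : Nat) : ∀ (rest : List String), rest.length ≤ m → ∀ result,
    sortedTagsAltLoop n result rest
      = result ++ (PySem.Set.ofList rest).filter (fun k => decide (n ≤ (rest.count k : Int))) := by
  induction m with
  | zero =>
      intro rest h result
      have : rest = [] := List.eq_nil_of_length_eq_zero (Nat.le_zero.mp h)
      subst this
      simp [sortedTagsAltLoop]
  | succ m ihm =>
      intro rest h result
      match rest with
      | [] => simp [sortedTagsAltLoop]
      | x :: tail =>
        rw [sortedTagsAltLoop]
        rw [ihm (tail.filter (fun y => y ≠ x))
              (le_trans (List.length_filter_le _ _) (by simpa using Nat.lt_succ_iff.mp (lt_of_lt_of_le (by simp) h)))]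
        rw [PySem.Set.ofList_cons, strip]
        rw [List.filter_cons]
        have hcong : (PySem.Set.ofList (tail.filter (fun y => y ≠ x))).filter
              (fun k => decide (n ≤ ((tail.filter (fun y => y ≠ x)).count k : Int)))
            = (PySem.Set.ofList (tail.filter (fun y => y ≠ x))).filter
              (fun k => decide (n ≤ (((x :: tail).count k : Nat) : Int))) := by
          apply List.filter_congr
          intro k hk
          have hkmem : k ∈ tail.filter (fun y => y ≠ x) := by
            simpa using (PySem.Set.mem_ofList _ _).mp hk
          have hkx : k ≠ x := by
            have := List.of_mem_filter hkmem
            simpa using this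
          have hcnt : (tail.filter (fun y => y ≠ x)).count k = (x :: tail).count k := by
            rw [List.count_filter (by simpa using hkx)]
            simp [Ne.symm hkx]
          rw [hcnt]
        rw [hcong]
        simp only [decide_eq_true_eq]
        split_ifs with hc
        · simp
        · simp

theorem sideB (liste : List String) (n : Int) :
    sortedTags_alt liste n
      = (PySem.Set.ofList liste).filter (fun k => decide (n ≤ (liste.count k : Int))) := by
  unfold sortedTags_alt
  simpa using sideB_go n liste.length liste le_rfl []

-- ===== VERDICT (by name: the statement is the Claim_ definition above) =====
theorem sortedTags_spec : Claim_equal_sortedTags := by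
  intro liste n _
  unfold Spec_sortedTags
  rw [sideA, sideB]
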